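-- pv_equiv track=rewrite | github.com/matuspintek-boop/ib111 | 02/p6_workdays.py | workdays
-- ===== SOURCE A (Python) =====
-- def first_day(year):
--     assert 1601 <= year
--     years = year - 1601
--     offset = years + years // 4 - years // 100 + years // 400
--     return offset % 7
--
-- def workdays(year):
--
--     working_days = 0
--     days_total = 365
--     if year % 4 == 0 and not (year % 100 == 0 and year % 400 != 0):
--         days_total += 1
--
--     day_first = first_day(year)
--
--     month = 1
--     day = 1
--
--     for i in range(0, days_total):
--         week_day = (day_first + i) % 7
--
--         if month == 1 or month == 3 or month == 5 \
--            or month == 7 or month == 8 or month == 10 \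
--            or month == 12:
--             if day > 31:
--                 day = 1
--                 month += 1
--
--         if month == 4 or month == 6 or month == 9 or month == 11:
--             if day > 30:
--                 day = 1
--                 month += 1
--
--         if month == 2:
--             if days_total == 365:
--                 if day > 28:
--                     day = 1
--                     month += 1
--             if days_total == 366:
--                 if day > 29:
--                     day = 1
--                     month += 1
--
--         if week_day < 5 and not ((month == 1 and day == 1)
--                                  or (month == 5 and day == 1)
--                                  or (month == 5 and day == 8)
--                                  or (month == 7 and day == 5)
--                                  or (month == 7 and day == 6)
--                                  or (month == 9 and day == 28)
--                                  or (month == 10 and day == 28)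
--                                  or (month == 11 and day == 17)
--                                  or (month == 12 and day == 24)
--                                  or (month == 12 and day == 25)
--                                  or (month == 12 and day == 26)):
--             working_days += 1
--         day += 1
--     return working_days - 2
-- ===== SOURCE B (Python) =====
-- def workdays(year):
--     assert 1601 <= year
--     years = year - 1601
--     day_first = (years + years // 4 - years // 100 + years // 400) % 7
--     leap = year % 4 == 0 and not (year % 100 == 0 and year % 400 != 0)
--     days_total = 366 if leap else 365
--     # weekends in closed form: full weeks + leftover days
--     weekends = 2 * (days_total // 7)
--     for k in range(days_total % 7):
--         if (day_first + k) % 7 >= 5: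
--             weekends += 1
--     working = days_total - weekends
--     # subtract holidays that fall on a weekday
--     month_days = [31, 29 if leap else 28, 31, 30, 31, 30, 31, 31, 30, 31, 30, 31]
--     cum = [0]
--     for m in month_days:
--         cum.append(cum[-1] + m)
--     for (m, d) in [(1, 1), (5, 1), (5, 8), (7, 5), (7, 6), (9, 28), (10, 28),
--                    (11, 17), (12, 24), (12, 25), (12, 26)]:
--         idx = cum[m - 1] + d - 1
--         if (day_first + idx) % 7 < 5:
--             working -= 1
--     return working - 2
-- ===== Notes on version B (the rewrite author's own statement) =====
-- stated objective: simpler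
-- what changed: Replaces the year-long day-by-day calendar simulation with a closed-form weekend count (two per full week plus the remaining partial week) and a fixed holiday scan over cumulative month lengths.
import Mathlib
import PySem

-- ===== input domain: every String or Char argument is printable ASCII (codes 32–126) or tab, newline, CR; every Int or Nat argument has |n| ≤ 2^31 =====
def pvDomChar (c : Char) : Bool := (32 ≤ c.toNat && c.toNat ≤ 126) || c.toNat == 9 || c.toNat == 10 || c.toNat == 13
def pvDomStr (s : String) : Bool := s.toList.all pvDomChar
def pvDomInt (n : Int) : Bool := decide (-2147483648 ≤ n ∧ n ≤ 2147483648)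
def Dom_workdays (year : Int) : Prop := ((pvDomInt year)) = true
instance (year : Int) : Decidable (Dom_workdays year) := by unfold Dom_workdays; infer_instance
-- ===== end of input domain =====

-- B replaces A's year-long day-by-day calendar simulation by a closed-form weekend count
-- plus a fixed holiday scan over cumulative month lengths (simpler decomposition).

-- ===== PORT A =====
-- the Python assert (AssertionError for years before the epoch) is excluded by Pre_workdays.
def first_day (year : Int) : Int :=
  let years := year - 1601
  let offset := years + PySem.Int.floordiv years 4 - PySem.Int.floordiv years 100
    + PySem.Int.floordiv years 400
  PySem.Int.mod offset 7

-- body of A's 'for i in range(0, days_total)' loop; state = (working_days, month, day)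
def workdaysStep (day_first : Int) (days_total : Int) (st : Int × Int × Int) (i : Int) :
    Int × Int × Int :=
  let working_days := st.1
  let month := st.2.1
  let day := st.2.2
  let week_day := PySem.Int.mod (day_first + i) 7
  let (month, day) :=
    if month == 1 || month == 3 || month == 5 || month == 7 || month == 8 || month == 10
        || month == 12 then
      if day > 31 then (month + 1, (1 : Int)) else (month, day)
    else (month, day)
  let (month, day) :=
    if month == 4 || month == 6 || month == 9 || month == 11 then
      if day > 30 then (month + 1, (1 : Int)) else (month, day)
    else (month, day)
  let (month, day) :=
    if month == 2 then
      let (month, day) :=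
        if days_total == 365 then
          if day > 28 then (month + 1, (1 : Int)) else (month, day)
        else (month, day)
      if days_total == 366 then
        if day > 29 then (month + 1, (1 : Int)) else (month, day)
      else (month, day)
    else (month, day)
  let working_days :=
    if week_day < 5 && !((month == 1 && day == 1)
        || (month == 5 && day == 1)
        || (month == 5 && day == 8)
        || (month == 7 && day == 5)
        || (month == 7 && day == 6)
        || (month == 9 && day == 28)
        || (month == 10 && day == 28)
        || (month == 11 && day == 17)
        || (month == 12 && day == 24)
        || (month == 12 && day == 25)
        || (month == 12 && day == 26)) then
      working_days + 1
    else working_days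
  (working_days, month, day + 1)

def workdaysBodyA (day_first : Int) (days_total : Int) : Int :=
  let st := (PySem.List.pyRange 0 days_total 1).foldl (workdaysStep day_first days_total)
    ((0 : Int), (1 : Int), (1 : Int))
  st.1 - 2

def workdays (year : Int) : Int :=
  let days_total : Int := 365
  let days_total :=
    if PySem.Int.mod year 4 == 0
        && !(PySem.Int.mod year 100 == 0 && !(PySem.Int.mod year 400 == 0)) then
      days_total + 1
    else days_total
  let day_first := first_day year
  workdaysBodyA day_first days_total

-- ===== PORT B =====
def workdaysBodyB (day_first : Int) (leap : Bool) (days_total : Int) : Int :=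
  let weekends : Int := 2 * PySem.Int.floordiv days_total 7
  let weekends := (PySem.List.pyRange 0 (PySem.Int.mod days_total 7) 1).foldl
    (fun w k => if PySem.Int.mod (day_first + k) 7 ≥ 5 then w + 1 else w) weekends
  let working := days_total - weekends
  let month_days : List Int :=
    [31, if leap then 29 else 28, 31, 30, 31, 30, 31, 31, 30, 31, 30, 31]
  let cum : List Int := month_days.foldl (fun c m => c ++ [c.getLast! + m]) [0]
  let working :=
    ([(1, 1), (5, 1), (5, 8), (7, 5), (7, 6), (9, 28), (10, 28),
      (11, 17), (12, 24), (12, 25), (12, 26)] : List (Int × Int)).foldl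
      (fun w md =>
        let idx := PySem.List.pyGetD cum (md.1 - 1) 0 + md.2 - 1
        if PySem.Int.mod (day_first + idx) 7 < 5 then w - 1 else w) working
  working - 2

def workdays_alt (year : Int) : Int :=
  let years := year - 1601
  let day_first := PySem.Int.mod (years + PySem.Int.floordiv years 4
    - PySem.Int.floordiv years 100 + PySem.Int.floordiv years 400) 7
  let leap := PySem.Int.mod year 4 == 0
    && !(PySem.Int.mod year 100 == 0 && !(PySem.Int.mod year 400 == 0))
  let days_total : Int := if leap then 366 else 365
  workdaysBodyB day_first leap days_total

-- ===== PRECONDITION & SPEC =====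
-- both Pythons assert the epoch lower bound on year; smaller years raise AssertionError in both.
def Pre_workdays (year : Int) : Prop := 1601 ≤ year
instance (year : Int) : Decidable (Pre_workdays year) := by unfold Pre_workdays; infer_instance
def pvWitness_workdays : Int := 2024
def Spec_workdays (year : Int) (out : Int) : Prop := out = workdays_alt year
instance (year : Int) (out : Int) : Decidable (Spec_workdays year out) := by
  unfold Spec_workdays; infer_instance

-- ===== CLAIM (what is proved, stated in full; the proofs are below) =====
def Claim_equal_workdays : Prop :=
  ∀ (year : Int), Dom_workdays year → Pre_workdays year → Spec_workdays year (workdays year)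

-- ===== LEMMAS AND PROOFS =====
-- the two bodies agree for every start weekday and both year lengths
set_option maxRecDepth 60000 in
theorem chunkA_0_365 : workdaysBodyA 0 365 = 250 := by
  unfold workdaysBodyA
  rw [show PySem.List.pyRange 0 365 1 = PySem.List.pyRange 0 183 1 ++ PySem.List.pyRange 183 365 1 from by decide,
    List.foldl_append,
    show List.foldl (workdaysStep 0 365) ((0:Int), (1:Int), (1:Int)) (PySem.List.pyRange 0 183 1)
      = ((128:Int), (7:Int), (3:Int)) from by decide]
  decide

theorem chunkB_0_365 : workdaysBodyB 0 false 365 = 250 := by decide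

set_option maxRecDepth 60000 in
theorem chunkA_1_365 : workdaysBodyA 1 365 = 251 := by
  unfold workdaysBodyA
  rw [show PySem.List.pyRange 0 365 1 = PySem.List.pyRange 0 183 1 ++ PySem.List.pyRange 183 365 1 from by decide,
    List.foldl_append,
    show List.foldl (workdaysStep 1 365) ((0:Int), (1:Int), (1:Int)) (PySem.List.pyRange 0 183 1)
      = ((128:Int), (7:Int), (3:Int)) from by decide]
  decide

theorem chunkB_1_365 : workdaysBodyB 1 false 365 = 251 := by decide

set_option maxRecDepth 60000 in
theorem chunkA_2_365 : workdaysBodyA 2 365 = 251 := by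
  unfold workdaysBodyA
  rw [show PySem.List.pyRange 0 365 1 = PySem.List.pyRange 0 183 1 ++ PySem.List.pyRange 183 365 1 from by decide,
    List.foldl_append,
    show List.foldl (workdaysStep 2 365) ((0:Int), (1:Int), (1:Int)) (PySem.List.pyRange 0 183 1)
      = ((128:Int), (7:Int), (3:Int)) from by decide]
  decide

theorem chunkB_2_365 : workdaysBodyB 2 false 365 = 251 := by decide

set_option maxRecDepth 60000 in
theorem chunkA_3_365 : workdaysBodyA 3 365 = 250 := by
  unfold workdaysBodyA
  rw [show PySem.List.pyRange 0 365 1 = PySem.List.pyRange 0 183 1 ++ PySem.List.pyRange 183 365 1 from by decide,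
    List.foldl_append,
    show List.foldl (workdaysStep 3 365) ((0:Int), (1:Int), (1:Int)) (PySem.List.pyRange 0 183 1)
      = ((128:Int), (7:Int), (3:Int)) from by decide]
  decide

theorem chunkB_3_365 : workdaysBodyB 3 false 365 = 250 := by decide

set_option maxRecDepth 60000 in
theorem chunkA_4_365 : workdaysBodyA 4 365 = 252 := by
  unfold workdaysBodyA
  rw [show PySem.List.pyRange 0 365 1 = PySem.List.pyRange 0 183 1 ++ PySem.List.pyRange 183 365 1 from by decide,
    List.foldl_append,
    show List.foldl (workdaysStep 4 365) ((0:Int), (1:Int), (1:Int)) (PySem.List.pyRange 0 183 1)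
      = ((130:Int), (7:Int), (3:Int)) from by decide]
  decide

theorem chunkB_4_365 : workdaysBodyB 4 false 365 = 252 := by decide

set_option maxRecDepth 60000 in
theorem chunkA_5_365 : workdaysBodyA 5 365 = 252 := by
  unfold workdaysBodyA
  rw [show PySem.List.pyRange 0 365 1 = PySem.List.pyRange 0 183 1 ++ PySem.List.pyRange 183 365 1 from by decide,
    List.foldl_append,
    show List.foldl (workdaysStep 5 365) ((0:Int), (1:Int), (1:Int)) (PySem.List.pyRange 0 183 1)
      = ((130:Int), (7:Int), (3:Int)) from by decide]
  decide

theorem chunkB_5_365 : workdaysBodyB 5 false 365 = 252 := by decide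

set_option maxRecDepth 60000 in
theorem chunkA_6_365 : workdaysBodyA 6 365 = 250 := by
  unfold workdaysBodyA
  rw [show PySem.List.pyRange 0 365 1 = PySem.List.pyRange 0 183 1 ++ PySem.List.pyRange 183 365 1 from by decide,
    List.foldl_append,
    show List.foldl (workdaysStep 6 365) ((0:Int), (1:Int), (1:Int)) (PySem.List.pyRange 0 183 1)
      = ((128:Int), (7:Int), (3:Int)) from by decide]
  decide

theorem chunkB_6_365 : workdaysBodyB 6 false 365 = 250 := by decide

set_option maxRecDepth 60000 in
theorem chunkA_0_366 : workdaysBodyA 0 366 = 252 := by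
  unfold workdaysBodyA
  rw [show PySem.List.pyRange 0 366 1 = PySem.List.pyRange 0 183 1 ++ PySem.List.pyRange 183 366 1 from by decide,
    List.foldl_append,
    show List.foldl (workdaysStep 0 366) ((0:Int), (1:Int), (1:Int)) (PySem.List.pyRange 0 183 1)
      = ((128:Int), (7:Int), (2:Int)) from by decide]
  decide

theorem chunkB_0_366 : workdaysBodyB 0 true 366 = 252 := by decide

set_option maxRecDepth 60000 in
theorem chunkA_1_366 : workdaysBodyA 1 366 = 252 := by
  unfold workdaysBodyA
  rw [show PySem.List.pyRange 0 366 1 = PySem.List.pyRange 0 183 1 ++ PySem.List.pyRange 183 366 1 from by decide,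
    List.foldl_append,
    show List.foldl (workdaysStep 1 366) ((0:Int), (1:Int), (1:Int)) (PySem.List.pyRange 0 183 1)
      = ((128:Int), (7:Int), (2:Int)) from by decide]
  decide

theorem chunkB_1_366 : workdaysBodyB 1 true 366 = 252 := by decide

set_option maxRecDepth 60000 in
theorem chunkA_2_366 : workdaysBodyA 2 366 = 251 := by
  unfold workdaysBodyA
  rw [show PySem.List.pyRange 0 366 1 = PySem.List.pyRange 0 183 1 ++ PySem.List.pyRange 183 366 1 from by decide,
    List.foldl_append,
    show List.foldl (workdaysStep 2 366) ((0:Int), (1:Int), (1:Int)) (PySem.List.pyRange 0 183 1)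
      = ((128:Int), (7:Int), (2:Int)) from by decide]
  decide

theorem chunkB_2_366 : workdaysBodyB 2 true 366 = 251 := by decide

set_option maxRecDepth 60000 in
theorem chunkA_3_366 : workdaysBodyA 3 366 = 253 := by
  unfold workdaysBodyA
  rw [show PySem.List.pyRange 0 366 1 = PySem.List.pyRange 0 183 1 ++ PySem.List.pyRange 183 366 1 from by decide,
    List.foldl_append,
    show List.foldl (workdaysStep 3 366) ((0:Int), (1:Int), (1:Int)) (PySem.List.pyRange 0 183 1)
      = ((130:Int), (7:Int), (2:Int)) from by decide]
  decide

theorem chunkB_3_366 : workdaysBodyB 3 true 366 = 253 := by decide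

set_option maxRecDepth 60000 in
theorem chunkA_4_366 : workdaysBodyA 4 366 = 252 := by
  unfold workdaysBodyA
  rw [show PySem.List.pyRange 0 366 1 = PySem.List.pyRange 0 183 1 ++ PySem.List.pyRange 183 366 1 from by decide,
    List.foldl_append,
    show List.foldl (workdaysStep 4 366) ((0:Int), (1:Int), (1:Int)) (PySem.List.pyRange 0 183 1)
      = ((130:Int), (7:Int), (2:Int)) from by decide]
  decide

theorem chunkB_4_366 : workdaysBodyB 4 true 366 = 252 := by decide

set_option maxRecDepth 60000 in
theorem chunkA_5_366 : workdaysBodyA 5 366 = 250 := by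
  unfold workdaysBodyA
  rw [show PySem.List.pyRange 0 366 1 = PySem.List.pyRange 0 183 1 ++ PySem.List.pyRange 183 366 1 from by decide,
    List.foldl_append,
    show List.foldl (workdaysStep 5 366) ((0:Int), (1:Int), (1:Int)) (PySem.List.pyRange 0 183 1)
      = ((128:Int), (7:Int), (2:Int)) from by decide]
  decide

theorem chunkB_5_366 : workdaysBodyB 5 true 366 = 250 := by decide

set_option maxRecDepth 60000 in
theorem chunkA_6_366 : workdaysBodyA 6 366 = 251 := by
  unfold workdaysBodyA
  rw [show PySem.List.pyRange 0 366 1 = PySem.List.pyRange 0 183 1 ++ PySem.List.pyRange 183 366 1 from by decide,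
    List.foldl_append,
    show List.foldl (workdaysStep 6 366) ((0:Int), (1:Int), (1:Int)) (PySem.List.pyRange 0 183 1)
      = ((128:Int), (7:Int), (2:Int)) from by decide]
  decide

theorem chunkB_6_366 : workdaysBodyB 6 true 366 = 251 := by decide

theorem body_eq_365 (d : Int) (h0 : 0 ≤ d) (h7 : d < 7) :
    workdaysBodyA d 365 = workdaysBodyB d false 365 := by
  interval_cases d
  · rw [chunkA_0_365, chunkB_0_365]
  · rw [chunkA_1_365, chunkB_1_365]
  · rw [chunkA_2_365, chunkB_2_365]
  · rw [chunkA_3_365, chunkB_3_365]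
  · rw [chunkA_4_365, chunkB_4_365]
  · rw [chunkA_5_365, chunkB_5_365]
  · rw [chunkA_6_365, chunkB_6_365]

theorem body_eq_366 (d : Int) (h0 : 0 ≤ d) (h7 : d < 7) :
    workdaysBodyA d 366 = workdaysBodyB d true 366 := by
  interval_cases d
  · rw [chunkA_0_366, chunkB_0_366]
  · rw [chunkA_1_366, chunkB_1_366]
  · rw [chunkA_2_366, chunkB_2_366]
  · rw [chunkA_3_366, chunkB_3_366]
  · rw [chunkA_4_366, chunkB_4_366]
  · rw [chunkA_5_366, chunkB_5_366]
  · rw [chunkA_6_366, chunkB_6_366]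

-- ===== VERDICT (by name: the statement is the Claim_ definition above) =====
theorem workdays_spec : Claim_equal_workdays := by
  intro year _ _
  unfold Spec_workdays workdays workdays_alt first_day
  have h0 : 0 ≤ PySem.Int.mod (year - 1601 + PySem.Int.floordiv (year - 1601) 4
      - PySem.Int.floordiv (year - 1601) 100 + PySem.Int.floordiv (year - 1601) 400) 7 :=
    PySem.Int.mod_nonneg _ (by norm_num)
  have h7 : PySem.Int.mod (year - 1601 + PySem.Int.floordiv (year - 1601) 4
      - PySem.Int.floordiv (year - 1601) 100 + PySem.Int.floordiv (year - 1601) 400) 7 < 7 :=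
    PySem.Int.mod_lt _ (by norm_num)
  by_cases hleap : (PySem.Int.mod year 4 == 0
      && !(PySem.Int.mod year 100 == 0 && !(PySem.Int.mod year 400 == 0))) = true
  · simp only [hleap, if_pos]
    exact body_eq_366 _ h0 h7
  · simp only [Bool.not_eq_true] at hleap
    simp only [hleap, Bool.false_eq_true, if_false]
    exact body_eq_365 _ h0 h7
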